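-- pv_equiv track=rewrite | github.com/TonyLLondon/family_tree | scripts/sync_family_tree_json.py | normalize_gedcom_date
-- ===== SOURCE A (Python) =====
-- _MONTHS = {
--     "JAN": 1,
--     "FEB": 2,
--     "MAR": 3,
--     "APR": 4,
--     "MAY": 5,
--     "JUN": 6,
--     "JUL": 7,
--     "AUG": 8,
--     "SEP": 9,
--     "OCT": 10,
--     "NOV": 11,
--     "DEC": 12,
-- }
--
-- def normalize_gedcom_date(s: str) -> str:
--     s = (s or "").strip()
--     if not s:
--         return ""
--     upper = s.upper()
--     for qual in ("ABT", "BEF", "AFT", "CAL", "EST"):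
--         prefix = qual + " "
--         if upper.startswith(prefix):
--             rest = normalize_gedcom_date(s[len(prefix) :].strip())
--             return f"{qual} {rest}".strip() if rest else s
--     if upper.startswith("BET ") and " AND " in upper:
--         return s
--     parts = s.split()
--     if (
--         len(parts) == 3
--         and parts[0].isdigit()
--         and parts[1].upper() in _MONTHS
--         and parts[2].isdigit()
--         and len(parts[2]) == 4
--     ):
--         d, m, y = int(parts[0]), _MONTHS[parts[1].upper()], int(parts[2])
--         return f"{y:04d}-{m:02d}-{d:02d}"
--     if len(parts) == 1 and parts[0].isdigit() and len(parts[0]) == 4: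
--         return parts[0]
--     return s
-- ===== SOURCE B (Python) =====
-- _MONTHS = {
--     "JAN": 1, "FEB": 2, "MAR": 3, "APR": 4, "MAY": 5, "JUN": 6,
--     "JUL": 7, "AUG": 8, "SEP": 9, "OCT": 10, "NOV": 11, "DEC": 12,
-- }
--
-- _QUALS = ("ABT", "BEF", "AFT", "CAL", "EST")
--
--
-- def _base(s: str) -> str:
--     if s.upper().startswith("BET ") and " AND " in s.upper():
--         return s
--     parts = s.split()
--     if (
--         len(parts) == 3
--         and parts[0].isdigit()
--         and parts[1].upper() in _MONTHS
--         and parts[2].isdigit()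
--         and len(parts[2]) == 4
--     ):
--         d, m, y = int(parts[0]), _MONTHS[parts[1].upper()], int(parts[2])
--         return f"{y:04d}-{m:02d}-{d:02d}"
--     if len(parts) == 1 and parts[0].isdigit() and len(parts[0]) == 4:
--         return parts[0]
--     return s
--
--
-- def normalize_gedcom_date(s: str) -> str:
--     s = (s or "").strip()
--     if not s:
--         return ""
--     quals = []
--     matched = True
--     while matched:
--         matched = False
--         upper = s.upper()
--         for qual in _QUALS:
--             if upper.startswith(qual + " "):
--                 quals.append(qual)
--                 s = s[len(qual) + 1:].strip()
--                 matched = True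
--                 break
--     quals.append(_base(s))
--     return " ".join(quals)
-- ===== Notes on version B (the rewrite author's own statement) =====
-- stated objective: alternative
-- what changed: The recursive qualifier-prefix peeling is rewritten as an iterative loop that accumulates the stripped qualifiers in a list and joins them with the normalized base date at the end, with the base-date logic factored into a helper instead of re-entering the whole function.
import Mathlib
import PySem

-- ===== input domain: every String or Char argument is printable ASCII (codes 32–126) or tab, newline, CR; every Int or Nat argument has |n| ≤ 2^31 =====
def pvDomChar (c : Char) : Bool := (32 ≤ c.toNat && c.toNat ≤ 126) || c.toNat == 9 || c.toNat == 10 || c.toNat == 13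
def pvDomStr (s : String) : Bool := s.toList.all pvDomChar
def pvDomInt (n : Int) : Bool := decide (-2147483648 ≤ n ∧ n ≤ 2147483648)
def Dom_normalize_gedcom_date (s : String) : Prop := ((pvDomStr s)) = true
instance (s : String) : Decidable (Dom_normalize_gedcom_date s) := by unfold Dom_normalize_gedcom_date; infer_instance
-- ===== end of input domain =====

-- B rewrites A's recursive qualifier-peeling as an iterative loop with an explicit
-- accumulator of qualifiers joined at the end; same return value on every input.

-- shared constant: the module-level _MONTHS dict (used by both Pythons)
def pvMonths : PySem.Dict (List Char) Int := PySem.Dict.mk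
  [("JAN".toList, 1), ("FEB".toList, 2), ("MAR".toList, 3), ("APR".toList, 4),
   ("MAY".toList, 5), ("JUN".toList, 6), ("JUL".toList, 7), ("AUG".toList, 8),
   ("SEP".toList, 9), ("OCT".toList, 10), ("NOV".toList, 11), ("DEC".toList, 12)]

-- termination helpers (cited by the ports' decreasing_by)
theorem pv_len_strip_le (x : List Char) : (PySem.Chars.strip x).length ≤ x.length := by
  simp only [PySem.Chars.strip, PySem.Chars.lstrip, PySem.Chars.rstrip]
  calc ((List.dropWhile PySem.Chars.isspace (List.dropWhile PySem.Chars.isspace x).reverse).reverse).length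
      = (List.dropWhile PySem.Chars.isspace (List.dropWhile PySem.Chars.isspace x).reverse).length := by
        rw [List.length_reverse]
    _ ≤ ((List.dropWhile PySem.Chars.isspace x).reverse).length := List.length_dropWhile_le _ _
    _ = (List.dropWhile PySem.Chars.isspace x).length := by rw [List.length_reverse]
    _ ≤ x.length := List.length_dropWhile_le _ _

theorem pv_sw_len {s p : List Char}
    (h : PySem.Chars.startswith (PySem.Chars.upper s) p = true) : p.length ≤ s.length := by
  simp only [PySem.Chars.startswith] at h
  have := (List.isPrefixOf_iff_prefix.mp h).length_le
  simpa [PySem.Chars.upper] using this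

theorem pv_slice4 (s : List Char) : PySem.Chars.slice s (some 4) none = s.drop 4 := by
  rw [PySem.Chars.slice_eq_listSlice, PySem.List.slice_from _ (by norm_num)]; rfl

theorem pv_decB {s p : List Char}
    (h : PySem.Chars.startswith (PySem.Chars.upper s) p = true) (hp : p.length = 4) :
    (PySem.Chars.strip (PySem.Chars.slice s (some 4) none)).length < s.length := by
  have h4 : 4 ≤ s.length := hp ▸ pv_sw_len h
  have h1 := pv_len_strip_le (PySem.Chars.slice s (some 4) none)
  rw [pv_slice4] at h1 ⊢
  simp only [List.length_drop] at h1
  omega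

theorem pv_decA {s0 p : List Char}
    (h : PySem.Chars.startswith (PySem.Chars.upper (PySem.Chars.strip s0)) p = true)
    (hp : p.length = 4) :
    (PySem.Chars.strip (PySem.Chars.slice (PySem.Chars.strip s0) (some 4) none)).length
      < s0.length :=
  lt_of_lt_of_le (pv_decB h hp) (pv_len_strip_le s0)

-- ===== PORT A =====
-- literal transliteration of A: after `s = (s or '').strip()` (`(s or '')` equals `s` as
-- a string) and the empty guard, the for-loop over the five qualifiers is unrolled into
-- the five prefix tests in order, each recursing on `s[len(prefix):].strip()`; then the
-- BET passthrough, the 3-part DD MON YYYY conversion (f"{y:04d}" = zfill(str(y),4); the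
-- int() calls are guarded by isdigit, so ofChars? is `some` there and getD 0 is exact),
-- the lone 4-digit year, else s.  Locals (upper, rest, parts, d/m/y) are inlined.
def pvCoreA (s0 : List Char) : List Char :=
  if PySem.Chars.strip s0 = [] then []
  else if h1 : PySem.Chars.startswith (PySem.Chars.upper (PySem.Chars.strip s0)) "ABT ".toList = true then
    (if pvCoreA (PySem.Chars.strip (PySem.Chars.slice (PySem.Chars.strip s0) (some 4) none)) = [] then PySem.Chars.strip s0
     else PySem.Chars.strip ("ABT".toList ++ " ".toList ++ pvCoreA (PySem.Chars.strip (PySem.Chars.slice (PySem.Chars.strip s0) (some 4) none))))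
  else if h2 : PySem.Chars.startswith (PySem.Chars.upper (PySem.Chars.strip s0)) "BEF ".toList = true then
    (if pvCoreA (PySem.Chars.strip (PySem.Chars.slice (PySem.Chars.strip s0) (some 4) none)) = [] then PySem.Chars.strip s0
     else PySem.Chars.strip ("BEF".toList ++ " ".toList ++ pvCoreA (PySem.Chars.strip (PySem.Chars.slice (PySem.Chars.strip s0) (some 4) none))))
  else if h3 : PySem.Chars.startswith (PySem.Chars.upper (PySem.Chars.strip s0)) "AFT ".toList = true then
    (if pvCoreA (PySem.Chars.strip (PySem.Chars.slice (PySem.Chars.strip s0) (some 4) none)) = [] then PySem.Chars.strip s0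
     else PySem.Chars.strip ("AFT".toList ++ " ".toList ++ pvCoreA (PySem.Chars.strip (PySem.Chars.slice (PySem.Chars.strip s0) (some 4) none))))
  else if h4 : PySem.Chars.startswith (PySem.Chars.upper (PySem.Chars.strip s0)) "CAL ".toList = true then
    (if pvCoreA (PySem.Chars.strip (PySem.Chars.slice (PySem.Chars.strip s0) (some 4) none)) = [] then PySem.Chars.strip s0
     else PySem.Chars.strip ("CAL".toList ++ " ".toList ++ pvCoreA (PySem.Chars.strip (PySem.Chars.slice (PySem.Chars.strip s0) (some 4) none))))
  else if h5 : PySem.Chars.startswith (PySem.Chars.upper (PySem.Chars.strip s0)) "EST ".toList = true then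
    (if pvCoreA (PySem.Chars.strip (PySem.Chars.slice (PySem.Chars.strip s0) (some 4) none)) = [] then PySem.Chars.strip s0
     else PySem.Chars.strip ("EST".toList ++ " ".toList ++ pvCoreA (PySem.Chars.strip (PySem.Chars.slice (PySem.Chars.strip s0) (some 4) none))))
  else if PySem.Chars.startswith (PySem.Chars.upper (PySem.Chars.strip s0)) "BET ".toList
        && PySem.Chars.isIn " AND ".toList (PySem.Chars.upper (PySem.Chars.strip s0)) then
    PySem.Chars.strip s0
  else
    match PySem.Chars.split₀ (PySem.Chars.strip s0) with
    | [p0, p1, p2] =>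
      if PySem.Chars.strIsdigit p0 && pvMonths.contains (PySem.Chars.upper p1)
          && PySem.Chars.strIsdigit p2 && p2.length == 4 then
        PySem.Chars.zfill (PySem.Int.toChars ((PySem.Int.ofChars? p2).getD 0)) 4
          ++ "-".toList ++ PySem.Chars.zfill (PySem.Int.toChars (pvMonths.getD (PySem.Chars.upper p1) 0)) 2
          ++ "-".toList ++ PySem.Chars.zfill (PySem.Int.toChars ((PySem.Int.ofChars? p0).getD 0)) 2
      else PySem.Chars.strip s0
    | [p0] =>
      if PySem.Chars.strIsdigit p0 && p0.length == 4 then p0 else PySem.Chars.strip s0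
    | _ => PySem.Chars.strip s0
termination_by s0.length
decreasing_by
  all_goals first
    | exact pv_decA h1 rfl | exact pv_decA h2 rfl | exact pv_decA h3 rfl
    | exact pv_decA h4 rfl | exact pv_decA h5 rfl

def normalize_gedcom_date (s : String) : String := String.ofList (pvCoreA s.toList)

-- ===== PORT B =====
-- B's `_base`: the BET passthrough, the 3-part conversion, the lone year, else s.
def pvBase (s : List Char) : List Char :=
  if PySem.Chars.startswith (PySem.Chars.upper s) "BET ".toList
      && PySem.Chars.isIn " AND ".toList (PySem.Chars.upper s) then s
  else
    match PySem.Chars.split₀ s with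
    | [p0, p1, p2] =>
      if PySem.Chars.strIsdigit p0 && pvMonths.contains (PySem.Chars.upper p1)
          && PySem.Chars.strIsdigit p2 && p2.length == 4 then
        PySem.Chars.zfill (PySem.Int.toChars ((PySem.Int.ofChars? p2).getD 0)) 4
          ++ "-".toList ++ PySem.Chars.zfill (PySem.Int.toChars (pvMonths.getD (PySem.Chars.upper p1) 0)) 2
          ++ "-".toList ++ PySem.Chars.zfill (PySem.Int.toChars ((PySem.Int.ofChars? p0).getD 0)) 2
      else s
    | [p0] =>
      if PySem.Chars.strIsdigit p0 && p0.length == 4 then p0 else s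
    | _ => s

-- B's while/for loop: repeatedly strip one qualifier prefix (first match of the five,
-- as the inner for-loop does), appending it to the accumulator `quals`.
def pvPeel (s : List Char) (quals : List (List Char)) : List (List Char) × List Char :=
  if h1 : PySem.Chars.startswith (PySem.Chars.upper s) "ABT ".toList = true then
    pvPeel (PySem.Chars.strip (PySem.Chars.slice s (some 4) none)) (quals ++ ["ABT".toList])
  else if h2 : PySem.Chars.startswith (PySem.Chars.upper s) "BEF ".toList = true then
    pvPeel (PySem.Chars.strip (PySem.Chars.slice s (some 4) none)) (quals ++ ["BEF".toList])
  else if h3 : PySem.Chars.startswith (PySem.Chars.upper s) "AFT ".toList = true then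
    pvPeel (PySem.Chars.strip (PySem.Chars.slice s (some 4) none)) (quals ++ ["AFT".toList])
  else if h4 : PySem.Chars.startswith (PySem.Chars.upper s) "CAL ".toList = true then
    pvPeel (PySem.Chars.strip (PySem.Chars.slice s (some 4) none)) (quals ++ ["CAL".toList])
  else if h5 : PySem.Chars.startswith (PySem.Chars.upper s) "EST ".toList = true then
    pvPeel (PySem.Chars.strip (PySem.Chars.slice s (some 4) none)) (quals ++ ["EST".toList])
  else (quals, s)
termination_by s.length
decreasing_by
  all_goals first
    | exact pv_decB h1 rfl | exact pv_decB h2 rfl | exact pv_decB h3 rfl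
    | exact pv_decB h4 rfl | exact pv_decB h5 rfl

def normalize_gedcom_date_alt (s : String) : String :=
  if PySem.Chars.strip s.toList = [] then ""
  else
    String.ofList (PySem.Chars.join " ".toList
      ((pvPeel (PySem.Chars.strip s.toList) []).1
        ++ [pvBase (pvPeel (PySem.Chars.strip s.toList) []).2]))

-- ===== PRECONDITION & SPEC =====
def Spec_normalize_gedcom_date (s : String) (out : String) : Prop := out = normalize_gedcom_date_alt s
instance (s : String) (out : String) : Decidable (Spec_normalize_gedcom_date s out) := by unfold Spec_normalize_gedcom_date; infer_instance

-- ===== CLAIM (what is proved, stated in full; the proofs are below) =====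
def Claim_equal_normalize_gedcom_date : Prop := ∀ (s : String), Dom_normalize_gedcom_date s → Spec_normalize_gedcom_date s (normalize_gedcom_date s)

-- ===== LEMMAS AND PROOFS =====

-- basic character facts
theorem pv_isspace_of_isdigit {c : Char} (h : PySem.Chars.isdigit c = true) :
    PySem.Chars.isspace c = false := by
  simp only [PySem.Chars.isdigit, Bool.and_eq_true, decide_eq_true_eq, Char.le_def,
    UInt32.le_iff_toNat_le] at h
  simp only [PySem.Chars.isspace, Bool.or_eq_false_iff, Bool.and_eq_false_iff,
    decide_eq_false_iff_not]
  have h0 : ('0' : Char).val.toNat = 48 := rfl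
  have h9 : ('9' : Char).val.toNat = 57 := rfl
  have hc : c.toNat = c.val.toNat := rfl
  omega

theorem pv_isspace_upperChar (c : Char) :
    PySem.Chars.isspace (PySem.Chars.upperChar c) = PySem.Chars.isspace c := by
  by_cases h : PySem.Chars.islower c = true
  · simp only [PySem.Chars.islower, Bool.and_eq_true, decide_eq_true_eq, Char.le_def,
      UInt32.le_iff_toNat_le] at h
    have ha : ('a' : Char).val.toNat = 97 := rfl
    have hz : ('z' : Char).val.toNat = 122 := rfl
    have hc : c.toNat = c.val.toNat := rfl
    have hv : ((Char.ofNat (c.toNat - 32)).toNat) = c.toNat - 32 := by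
      rw [Char.toNat_ofNat]
      have : (c.toNat - 32).isValidChar := by left; omega
      simp [this]
    simp only [PySem.Chars.upperChar, PySem.Chars.islower]
    rw [if_pos (by simp only [Bool.and_eq_true, decide_eq_true_eq, Char.le_def,
      UInt32.le_iff_toNat_le]; omega)]
    have hcf : PySem.Chars.isspace c = false := by
      simp only [PySem.Chars.isspace, Bool.or_eq_false_iff, Bool.and_eq_false_iff,
        decide_eq_false_iff_not]
      omega
    have huf : PySem.Chars.isspace (Char.ofNat (c.toNat - 32)) = false := by
      simp only [PySem.Chars.isspace, hv, Bool.or_eq_false_iff, Bool.and_eq_false_iff,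
        decide_eq_false_iff_not]
      omega
    rw [hcf, huf]
  · simp [PySem.Chars.upperChar, h]

-- dropWhile facts
theorem pv_dw_cons_self {p : Char → Bool} {c : Char} {t : List Char}
    (h : List.dropWhile p (c :: t) = c :: t) : p c = false := by
  by_cases hpc : p c = true
  · rw [List.dropWhile_cons, if_pos hpc] at h
    have h1 := congrArg List.length h
    have h2 := List.length_dropWhile_le p t
    simp at h1; omega
  · simpa using hpc

theorem pv_dw_idem (p : Char → Bool) (l : List Char) :
    List.dropWhile p (List.dropWhile p l) = List.dropWhile p l := by
  rw [List.dropWhile_eq_self_iff]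
  intro hl
  have hne : List.dropWhile p l ≠ [] := by
    intro h; rw [h] at hl; simp at hl
  have := List.head_dropWhile_not p hne
  rw [List.head_eq_getElem] at this
  exact ne_true_of_eq_false this

theorem pv_good_elim {l : List Char} (h : PySem.Chars.strip l = l) :
    List.dropWhile PySem.Chars.isspace l = l ∧
      List.dropWhile PySem.Chars.isspace l.reverse = l.reverse := by
  simp only [PySem.Chars.strip, PySem.Chars.lstrip, PySem.Chars.rstrip] at h
  have hsuf : List.dropWhile PySem.Chars.isspace l <:+ l := List.dropWhile_suffix _
  have hlen : (List.dropWhile PySem.Chars.isspace l).length = l.length := by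
    have h1 := congrArg List.length h
    have h2 := List.length_dropWhile_le PySem.Chars.isspace
      (List.dropWhile PySem.Chars.isspace l).reverse
    have h3 := List.length_dropWhile_le PySem.Chars.isspace l
    simp only [List.length_reverse] at h1 h2
    omega
  have hfix : List.dropWhile PySem.Chars.isspace l = l := hsuf.eq_of_length hlen
  refine ⟨hfix, ?_⟩
  rw [hfix] at h
  have := congrArg List.reverse h
  rwa [List.reverse_reverse] at this

theorem pv_good_intro {l : List Char}
    (h1 : List.dropWhile PySem.Chars.isspace l = l)
    (h2 : List.dropWhile PySem.Chars.isspace l.reverse = l.reverse) :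
    PySem.Chars.strip l = l := by
  simp only [PySem.Chars.strip, PySem.Chars.lstrip, PySem.Chars.rstrip, h1, h2,
    List.reverse_reverse]

theorem pv_strip_strip (l : List Char) :
    PySem.Chars.strip (PySem.Chars.strip l) = PySem.Chars.strip l := by
  apply pv_good_intro
  · rw [List.dropWhile_eq_self_iff]
    intro hl
    have hy : PySem.Chars.strip l <+: List.dropWhile PySem.Chars.isspace l := by
      simp only [PySem.Chars.strip, PySem.Chars.lstrip, PySem.Chars.rstrip]
      rw [← List.reverse_suffix]
      simpa using List.dropWhile_suffix (l := (List.dropWhile PySem.Chars.isspace l).reverse)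
        PySem.Chars.isspace
    have hlen := hy.length_le
    rw [hy.getElem hl]
    have hne : List.dropWhile PySem.Chars.isspace l ≠ [] := by
      intro h0
      rw [h0, List.prefix_nil] at hy
      rw [hy] at hl; simp at hl
    have := List.head_dropWhile_not PySem.Chars.isspace hne
    rw [List.head_eq_getElem] at this
    exact ne_true_of_eq_false this
  · simp only [PySem.Chars.strip, PySem.Chars.lstrip, PySem.Chars.rstrip,
      List.reverse_reverse]
    exact pv_dw_idem _ _

theorem pv_all_isspace_of_strip_nil {l : List Char} (h : PySem.Chars.strip l = []) :
    ∀ c ∈ l, PySem.Chars.isspace c = true := by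
  simp only [PySem.Chars.strip, PySem.Chars.lstrip, PySem.Chars.rstrip] at h
  rw [List.reverse_eq_nil_iff, List.dropWhile_eq_nil_iff] at h
  intro c hc
  rw [← List.takeWhile_append_dropWhile (p := PySem.Chars.isspace) (l := l)] at hc
  rcases List.mem_append.mp hc with h1 | h1
  · exact List.mem_takeWhile_imp h1
  · exact h c (List.mem_reverse.mpr h1)

theorem pv_rstrip_fix_of_nonspace {l : List Char}
    (h : ∀ c ∈ l, PySem.Chars.isspace c = false) :
    List.dropWhile PySem.Chars.isspace l.reverse = l.reverse := by
  rw [List.dropWhile_eq_self_iff]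
  intro hl
  have : l.reverse[0] ∈ l := List.mem_reverse.mp (List.getElem_mem hl)
  simpa using h _ this

theorem pv_strip_mid {c : Char} {q rest : List Char}
    (hc : PySem.Chars.isspace c = false)
    (hr : List.dropWhile PySem.Chars.isspace rest.reverse = rest.reverse)
    (hne : rest ≠ []) :
    PySem.Chars.strip (c :: (q ++ ' ' :: rest)) = c :: (q ++ ' ' :: rest) := by
  apply pv_good_intro
  · rw [List.dropWhile_cons, if_neg (by simp [hc])]
  · have hrv : rest.reverse ≠ [] := by simpa using hne
    rcases hd : rest.reverse with _ | ⟨d, t⟩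
    · exact absurd hd hrv
    · have hdns : PySem.Chars.isspace d = false := pv_dw_cons_self (hd ▸ hr)
      have hsplit : (c :: (q ++ ' ' :: rest)).reverse
          = d :: (t ++ (' ' :: (q.reverse ++ [c]))) := by
        simp [List.reverse_cons, List.reverse_append, hd]
      rw [hsplit, List.dropWhile_cons, if_neg (by simp [hdns])]

theorem pv_strip_drop_ne {s q : List Char} (hg : PySem.Chars.strip s = s) (hne : s ≠ [])
    (h : PySem.Chars.startswith (PySem.Chars.upper s) (q ++ [' ']) = true)
    (hq : q.length = 3) :
    PySem.Chars.strip (s.drop 4) ≠ [] := by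
  have hgr := (pv_good_elim hg).2
  intro hnil
  have hall := pv_all_isspace_of_strip_nil hnil
  have hpre : (q ++ [' ']) <+: PySem.Chars.upper s := by
    simp only [PySem.Chars.startswith] at h
    exact List.isPrefixOf_iff_prefix.mp h
  have hulen : (PySem.Chars.upper s).length = s.length := by
    simp [PySem.Chars.upper]
  have hlen4 : 4 ≤ s.length := by
    have := hpre.length_le
    simp [hulen, hq] at this
    omega
  rcases hd : s.drop 4 with _ | ⟨a, as⟩
  · -- s has length exactly 4, so the last char of s maps to the ' ' of the prefix
    have hslen : s.length = 4 := by
      have := congrArg List.length hd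
      simp at this
      omega
    have hup : PySem.Chars.upper s = q ++ [' '] :=
      (hpre.eq_of_length (by simp [hulen, hq, hslen])).symm
    rcases hrv : s.reverse with _ | ⟨e, es⟩
    · exact hne (by simpa using congrArg List.reverse hrv)
    · have hPe : PySem.Chars.isspace e = false := pv_dw_cons_self (hrv ▸ hgr)
      have hmap : (PySem.Chars.upper s).reverse
          = List.map PySem.Chars.upperChar s.reverse := by
        simp [PySem.Chars.upper, List.map_reverse]
      rw [hup, hrv] at hmap
      simp only [List.reverse_append, List.reverse_cons, List.reverse_nil,
        List.nil_append, List.cons_append, List.map_cons] at hmap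
      have he : PySem.Chars.upperChar e = ' ' := by
        injection hmap with h1 _
        exact h1.symm
      have : PySem.Chars.isspace (PySem.Chars.upperChar e) = true := by
        rw [he]; rfl
      rw [pv_isspace_upperChar, hPe] at this
      exact Bool.false_ne_true this
  · -- s.drop 4 is nonempty and all whitespace, contradicting that s is right-stripped
    have hrne : (s.drop 4).reverse ≠ [] := by rw [hd]; simp
    rcases hrv : (s.drop 4).reverse with _ | ⟨b, bs⟩
    · exact hrne hrv
    · have hmem : b ∈ s.drop 4 := by
        rw [← List.mem_reverse, hrv]; exact List.mem_cons_self
      have hsplit : s.reverse = b :: (bs ++ (s.take 4).reverse) := by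
        conv_lhs => rw [← List.take_append_drop 4 s]
        rw [List.reverse_append, hrv]
        simp
      have hPb : PySem.Chars.isspace b = false := pv_dw_cons_self (hsplit ▸ hgr)
      rw [hall b hmem] at hPb
      simp at hPb

theorem pv_isspace_digitChar (m : Nat) : PySem.Chars.isspace (Nat.digitChar m) = false := by
  match m with
  | 0 | 1 | 2 | 3 | 4 | 5 | 6 | 7 | 8 | 9 | 10 | 11 | 12 | 13 | 14 | 15 => rfl
  | (m + 16) => rfl

theorem pv_toDigitsCore_mem :
    ∀ (f : Nat) (b n : Nat) (acc : List Char) (c : Char),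
      c ∈ Nat.toDigitsCore b f n acc → c ∈ acc ∨ ∃ m, c = Nat.digitChar m := by
  intro f
  induction f with
  | zero => intro b n acc c hc; rw [Nat.toDigitsCore] at hc; exact Or.inl hc
  | succ f ih =>
    intro b n acc c hc
    rw [Nat.toDigitsCore] at hc
    by_cases h0 : n / b = 0
    · rw [if_pos h0] at hc
      rcases List.mem_cons.mp hc with h | h
      · exact Or.inr ⟨_, h⟩
      · exact Or.inl h
    · rw [if_neg h0] at hc
      rcases ih b (n / b) _ c hc with h | h
      · rcases List.mem_cons.mp h with h' | h'
        · exact Or.inr ⟨_, h'⟩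
        · exact Or.inl h'
      · exact Or.inr h

theorem pv_isspace_mem_toChars {c : Char} {n : Int} (h : c ∈ PySem.Int.toChars n) :
    PySem.Chars.isspace c = false := by
  have hdig : ∀ (m : Nat), c ∈ Nat.toDigits 10 m → PySem.Chars.isspace c = false := by
    intro m hm
    rcases pv_toDigitsCore_mem _ _ _ _ _ hm with h' | ⟨k, hk⟩
    · simp at h'
    · rw [hk]; exact pv_isspace_digitChar k
  unfold PySem.Int.toChars at h
  split at h
  · rcases List.mem_cons.mp h with h' | h'
    · rw [h']; rfl
    · exact hdig _ h'
  · exact hdig _ h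

theorem pv_mem_zfill {c : Char} {cs : List Char} {w : Int}
    (h : c ∈ PySem.Chars.zfill cs w) : c = '0' ∨ c ∈ cs := by
  unfold PySem.Chars.zfill at h
  by_cases hw : w ≤ (cs.length : Int)
  · rw [if_pos hw] at h; exact Or.inr h
  · rw [if_neg hw] at h
    rcases cs with _ | ⟨c0, rest⟩
    · exact Or.inl (List.eq_of_mem_replicate h)
    · dsimp only at h
      by_cases hs : c0 = '+' ∨ c0 = '-'
      · rw [if_pos hs] at h
        rcases List.mem_cons.mp h with h' | h'
        · exact Or.inr (h' ▸ List.mem_cons_self)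
        · rcases List.mem_append.mp h' with h'' | h''
          · exact Or.inl (List.eq_of_mem_replicate h'')
          · exact Or.inr (List.mem_cons_of_mem _ h'')
      · rw [if_neg hs] at h
        rcases List.mem_append.mp h with h' | h'
        · exact Or.inl (List.eq_of_mem_replicate h')
        · exact Or.inr h'

theorem pv_isspace_mem_zfill_toChars {c : Char} {n w : Int}
    (h : c ∈ PySem.Chars.zfill (PySem.Int.toChars n) w) :
    PySem.Chars.isspace c = false := by
  rcases pv_mem_zfill h with h' | h'
  · rw [h']; rfl
  · exact pv_isspace_mem_toChars h'

-- the right-strippedness and nonemptiness of B's `_base` on a stripped nonempty input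
theorem pv_base_props {t : List Char} (hg : PySem.Chars.strip t = t) (hne : t ≠ []) :
    List.dropWhile PySem.Chars.isspace (pvBase t).reverse = (pvBase t).reverse
      ∧ pvBase t ≠ [] := by
  have ht : List.dropWhile PySem.Chars.isspace t.reverse = t.reverse ∧ t ≠ [] :=
    ⟨(pv_good_elim hg).2, hne⟩
  have hdash : "-".toList = ['-'] := rfl
  unfold pvBase
  split
  · exact ht
  split
  · -- three parts
    split
    · constructor
      · apply pv_rstrip_fix_of_nonspace
        intro c hc
        simp only [List.append_assoc, List.mem_append] at hc
        rcases hc with h | h | h | h | h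
        · exact pv_isspace_mem_zfill_toChars h
        · rw [hdash] at h; simp at h; rw [h]; rfl
        · exact pv_isspace_mem_zfill_toChars h
        · rw [hdash] at h; simp at h; rw [h]; rfl
        · exact pv_isspace_mem_zfill_toChars h
      · intro h0
        have := congrArg List.length h0
        simp [PySem.Chars.length_zfill] at this
    · exact ht
  · -- a single part
    split
    · rename_i hcond
      simp only [Bool.and_eq_true, PySem.Chars.strIsdigit, List.all_eq_true,
        Bool.not_eq_eq_eq_not, Bool.not_true, List.isEmpty_eq_false_iff] at hcond
      obtain ⟨⟨hne0, hdig⟩, _⟩ := hcond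
      refine ⟨pv_rstrip_fix_of_nonspace (fun c hc => pv_isspace_of_isdigit (hdig c hc)), hne0⟩
    · exact ht
  · exact ht

theorem pv_peel_acc : ∀ (s : List Char) (qs : List (List Char)),
    pvPeel s qs = (qs ++ (pvPeel s []).1, (pvPeel s []).2) := by
  have H : ∀ (n : Nat) (s : List Char) (qs : List (List Char)), s.length = n →
      pvPeel s qs = (qs ++ (pvPeel s []).1, (pvPeel s []).2) := by
    intro n
    induction n using Nat.strong_induction_on with
    | _ n ih =>
      intro s qs hn
      rw [pvPeel.eq_def, pvPeel.eq_def (s := s) (quals := [])]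
      by_cases h1 : PySem.Chars.startswith (PySem.Chars.upper s) "ABT ".toList = true
      · rw [dif_pos h1, dif_pos h1]
        rw [ih _ (hn ▸ pv_decB h1 rfl) _ _ rfl,
            ih _ (hn ▸ pv_decB h1 rfl) _ ([] ++ ["ABT".toList]) rfl]
        simp
      rw [dif_neg h1, dif_neg h1]
      by_cases h2 : PySem.Chars.startswith (PySem.Chars.upper s) "BEF ".toList = true
      · rw [dif_pos h2, dif_pos h2]
        rw [ih _ (hn ▸ pv_decB h2 rfl) _ _ rfl,
            ih _ (hn ▸ pv_decB h2 rfl) _ ([] ++ ["BEF".toList]) rfl]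
        simp
      rw [dif_neg h2, dif_neg h2]
      by_cases h3 : PySem.Chars.startswith (PySem.Chars.upper s) "AFT ".toList = true
      · rw [dif_pos h3, dif_pos h3]
        rw [ih _ (hn ▸ pv_decB h3 rfl) _ _ rfl,
            ih _ (hn ▸ pv_decB h3 rfl) _ ([] ++ ["AFT".toList]) rfl]
        simp
      rw [dif_neg h3, dif_neg h3]
      by_cases h4 : PySem.Chars.startswith (PySem.Chars.upper s) "CAL ".toList = true
      · rw [dif_pos h4, dif_pos h4]
        rw [ih _ (hn ▸ pv_decB h4 rfl) _ _ rfl,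
            ih _ (hn ▸ pv_decB h4 rfl) _ ([] ++ ["CAL".toList]) rfl]
        simp
      rw [dif_neg h4, dif_neg h4]
      by_cases h5 : PySem.Chars.startswith (PySem.Chars.upper s) "EST ".toList = true
      · rw [dif_pos h5, dif_pos h5]
        rw [ih _ (hn ▸ pv_decB h5 rfl) _ _ rfl,
            ih _ (hn ▸ pv_decB h5 rfl) _ ([] ++ ["EST".toList]) rfl]
        simp
      rw [dif_neg h5, dif_neg h5]
      simp
  exact fun s qs => H s.length s qs rfl

-- one qualifier-peeling step: A's nested reconstruction equals B's accumulated join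
theorem pv_qual_step {t : List Char} {c : Char} {q : List Char}
    (hc : PySem.Chars.isspace c = false)
    (hpeel : pvPeel t [] = pvPeel (PySem.Chars.strip (PySem.Chars.slice t (some 4) none)) [c :: q])
    (hrest1 : pvCoreA (PySem.Chars.strip (PySem.Chars.slice t (some 4) none)) =
      PySem.Chars.join " ".toList
        ((pvPeel (PySem.Chars.strip (PySem.Chars.slice t (some 4) none)) []).1 ++ [pvBase (pvPeel (PySem.Chars.strip (PySem.Chars.slice t (some 4) none)) []).2]))
    (hrest2 : List.dropWhile PySem.Chars.isspace (pvCoreA (PySem.Chars.strip (PySem.Chars.slice t (some 4) none))).reverse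
      = (pvCoreA (PySem.Chars.strip (PySem.Chars.slice t (some 4) none))).reverse)
    (hrest3 : pvCoreA (PySem.Chars.strip (PySem.Chars.slice t (some 4) none)) ≠ []) :
    ((if pvCoreA (PySem.Chars.strip (PySem.Chars.slice t (some 4) none)) = [] then t
      else PySem.Chars.strip ((c :: q) ++ " ".toList ++ pvCoreA (PySem.Chars.strip (PySem.Chars.slice t (some 4) none)))) =
      PySem.Chars.join " ".toList ((pvPeel t []).1 ++ [pvBase (pvPeel t []).2]))
    ∧ List.dropWhile PySem.Chars.isspace
        ((if pvCoreA (PySem.Chars.strip (PySem.Chars.slice t (some 4) none)) = [] then t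
          else PySem.Chars.strip ((c :: q) ++ " ".toList ++ pvCoreA (PySem.Chars.strip (PySem.Chars.slice t (some 4) none)))) : List Char).reverse
      = ((if pvCoreA (PySem.Chars.strip (PySem.Chars.slice t (some 4) none)) = [] then t
          else PySem.Chars.strip ((c :: q) ++ " ".toList ++ pvCoreA (PySem.Chars.strip (PySem.Chars.slice t (some 4) none)))) : List Char).reverse
    ∧ (if pvCoreA (PySem.Chars.strip (PySem.Chars.slice t (some 4) none)) = [] then t
        else PySem.Chars.strip ((c :: q) ++ " ".toList ++ pvCoreA (PySem.Chars.strip (PySem.Chars.slice t (some 4) none)))) ≠ [] := by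
  rw [if_neg hrest3]
  have hassoc : (c :: q) ++ " ".toList ++ pvCoreA (PySem.Chars.strip (PySem.Chars.slice t (some 4) none))
      = c :: (q ++ ' ' :: pvCoreA (PySem.Chars.strip (PySem.Chars.slice t (some 4) none))) := by
    simp [show " ".toList = [' '] from rfl]
  rw [hassoc]
  have hfix := pv_strip_mid (q := q) hc hrest2 hrest3
  rw [hfix]
  refine ⟨?_, (pv_good_elim hfix).2, by simp⟩
  rw [hpeel, pv_peel_acc (PySem.Chars.strip (PySem.Chars.slice t (some 4) none)) [c :: q]]
  dsimp only
  rcases hP : (pvPeel (PySem.Chars.strip (PySem.Chars.slice t (some 4) none)) []).1 ++ [pvBase (pvPeel (PySem.Chars.strip (PySem.Chars.slice t (some 4) none)) []).2] with _ | ⟨x, xs⟩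
  · simp at hP
  · have : ([c :: q] ++ (pvPeel (PySem.Chars.strip (PySem.Chars.slice t (some 4) none)) []).1) ++ [pvBase (pvPeel (PySem.Chars.strip (PySem.Chars.slice t (some 4) none)) []).2]
        = (c :: q) :: (x :: xs) := by
      rw [List.append_assoc, hP]; rfl
    rw [this, PySem.Chars.join_cons_cons, ← hP, ← hrest1]
    simp [show " ".toList = [' '] from rfl]

-- with no qualifier prefix, A's tail is literally B's `_base`
theorem pv_coreA_base {s0 : List Char} (hs0 : ¬ (PySem.Chars.strip s0 = []))
    (h1 : ¬ (PySem.Chars.startswith (PySem.Chars.upper (PySem.Chars.strip s0)) "ABT ".toList = true))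
    (h2 : ¬ (PySem.Chars.startswith (PySem.Chars.upper (PySem.Chars.strip s0)) "BEF ".toList = true))
    (h3 : ¬ (PySem.Chars.startswith (PySem.Chars.upper (PySem.Chars.strip s0)) "AFT ".toList = true))
    (h4 : ¬ (PySem.Chars.startswith (PySem.Chars.upper (PySem.Chars.strip s0)) "CAL ".toList = true))
    (h5 : ¬ (PySem.Chars.startswith (PySem.Chars.upper (PySem.Chars.strip s0)) "EST ".toList = true)) :
    pvCoreA s0 = pvBase (PySem.Chars.strip s0) := by
  rw [pvCoreA.eq_def, if_neg hs0, dif_neg h1, dif_neg h2, dif_neg h3, dif_neg h4, dif_neg h5]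
  rw [pvBase.eq_def]

theorem pv_peel_none {t : List Char}
    (h1 : ¬ (PySem.Chars.startswith (PySem.Chars.upper t) "ABT ".toList = true))
    (h2 : ¬ (PySem.Chars.startswith (PySem.Chars.upper t) "BEF ".toList = true))
    (h3 : ¬ (PySem.Chars.startswith (PySem.Chars.upper t) "AFT ".toList = true))
    (h4 : ¬ (PySem.Chars.startswith (PySem.Chars.upper t) "CAL ".toList = true))
    (h5 : ¬ (PySem.Chars.startswith (PySem.Chars.upper t) "EST ".toList = true)) :
    pvPeel t [] = ([], t) := by
  rw [pvPeel.eq_def, dif_neg h1, dif_neg h2, dif_neg h3, dif_neg h4, dif_neg h5]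

theorem pv_main : ∀ (n : Nat) (s0 : List Char), s0.length = n →
    PySem.Chars.strip s0 ≠ [] →
    (pvCoreA s0 = PySem.Chars.join " ".toList
      ((pvPeel (PySem.Chars.strip s0) []).1 ++ [pvBase (pvPeel (PySem.Chars.strip s0) []).2]))
    ∧ List.dropWhile PySem.Chars.isspace (pvCoreA s0).reverse = (pvCoreA s0).reverse
    ∧ pvCoreA s0 ≠ [] := by
  intro n
  induction n using Nat.strong_induction_on with
  | _ n ih =>
    intro s0 hn hs0
    have hg : PySem.Chars.strip (PySem.Chars.strip s0) = PySem.Chars.strip s0 := pv_strip_strip s0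
    by_cases h1 : PySem.Chars.startswith (PySem.Chars.upper (PySem.Chars.strip s0)) "ABT ".toList = true
    · have hXne : PySem.Chars.strip (PySem.Chars.slice (PySem.Chars.strip s0) (some 4) none) ≠ [] := by
        rw [pv_slice4]
        exact pv_strip_drop_ne (pv_strip_strip s0) hs0 (q := "ABT".toList) h1 rfl
      have hrec := ih _ (hn ▸ pv_decA h1 rfl) _ rfl
        (by rw [pv_strip_strip]; exact hXne)
      rw [pv_strip_strip] at hrec
      have hcore : pvCoreA s0 = (if pvCoreA (PySem.Chars.strip (PySem.Chars.slice (PySem.Chars.strip s0) (some 4) none)) = [] then PySem.Chars.strip s0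
          else PySem.Chars.strip ("ABT".toList ++ " ".toList ++ pvCoreA (PySem.Chars.strip (PySem.Chars.slice (PySem.Chars.strip s0) (some 4) none)))) := by
        rw [pvCoreA.eq_def, if_neg hs0, dif_pos h1]
      have hpeel : pvPeel (PySem.Chars.strip s0) [] = pvPeel (PySem.Chars.strip (PySem.Chars.slice (PySem.Chars.strip s0) (some 4) none)) ["ABT".toList] := by
        rw [pvPeel.eq_def, dif_pos h1]; rfl
      rw [hcore]
      exact pv_qual_step (c := 'A') (q := "BT".toList) rfl hpeel hrec.1 hrec.2.1 hrec.2.2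
    by_cases h2 : PySem.Chars.startswith (PySem.Chars.upper (PySem.Chars.strip s0)) "BEF ".toList = true
    · have hXne : PySem.Chars.strip (PySem.Chars.slice (PySem.Chars.strip s0) (some 4) none) ≠ [] := by
        rw [pv_slice4]
        exact pv_strip_drop_ne (pv_strip_strip s0) hs0 (q := "BEF".toList) h2 rfl
      have hrec := ih _ (hn ▸ pv_decA h2 rfl) _ rfl
        (by rw [pv_strip_strip]; exact hXne)
      rw [pv_strip_strip] at hrec
      have hcore : pvCoreA s0 = (if pvCoreA (PySem.Chars.strip (PySem.Chars.slice (PySem.Chars.strip s0) (some 4) none)) = [] then PySem.Chars.strip s0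
          else PySem.Chars.strip ("BEF".toList ++ " ".toList ++ pvCoreA (PySem.Chars.strip (PySem.Chars.slice (PySem.Chars.strip s0) (some 4) none)))) := by
        rw [pvCoreA.eq_def, if_neg hs0, dif_neg h1, dif_pos h2]
      have hpeel : pvPeel (PySem.Chars.strip s0) [] = pvPeel (PySem.Chars.strip (PySem.Chars.slice (PySem.Chars.strip s0) (some 4) none)) ["BEF".toList] := by
        rw [pvPeel.eq_def, dif_neg h1, dif_pos h2]; rfl
      rw [hcore]
      exact pv_qual_step (c := 'B') (q := "EF".toList) rfl hpeel hrec.1 hrec.2.1 hrec.2.2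
    by_cases h3 : PySem.Chars.startswith (PySem.Chars.upper (PySem.Chars.strip s0)) "AFT ".toList = true
    · have hXne : PySem.Chars.strip (PySem.Chars.slice (PySem.Chars.strip s0) (some 4) none) ≠ [] := by
        rw [pv_slice4]
        exact pv_strip_drop_ne (pv_strip_strip s0) hs0 (q := "AFT".toList) h3 rfl
      have hrec := ih _ (hn ▸ pv_decA h3 rfl) _ rfl
        (by rw [pv_strip_strip]; exact hXne)
      rw [pv_strip_strip] at hrec
      have hcore : pvCoreA s0 = (if pvCoreA (PySem.Chars.strip (PySem.Chars.slice (PySem.Chars.strip s0) (some 4) none)) = [] then PySem.Chars.strip s0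
          else PySem.Chars.strip ("AFT".toList ++ " ".toList ++ pvCoreA (PySem.Chars.strip (PySem.Chars.slice (PySem.Chars.strip s0) (some 4) none)))) := by
        rw [pvCoreA.eq_def, if_neg hs0, dif_neg h1, dif_neg h2, dif_pos h3]
      have hpeel : pvPeel (PySem.Chars.strip s0) [] = pvPeel (PySem.Chars.strip (PySem.Chars.slice (PySem.Chars.strip s0) (some 4) none)) ["AFT".toList] := by
        rw [pvPeel.eq_def, dif_neg h1, dif_neg h2, dif_pos h3]; rfl
      rw [hcore]
      exact pv_qual_step (c := 'A') (q := "FT".toList) rfl hpeel hrec.1 hrec.2.1 hrec.2.2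
    by_cases h4 : PySem.Chars.startswith (PySem.Chars.upper (PySem.Chars.strip s0)) "CAL ".toList = true
    · have hXne : PySem.Chars.strip (PySem.Chars.slice (PySem.Chars.strip s0) (some 4) none) ≠ [] := by
        rw [pv_slice4]
        exact pv_strip_drop_ne (pv_strip_strip s0) hs0 (q := "CAL".toList) h4 rfl
      have hrec := ih _ (hn ▸ pv_decA h4 rfl) _ rfl
        (by rw [pv_strip_strip]; exact hXne)
      rw [pv_strip_strip] at hrec
      have hcore : pvCoreA s0 = (if pvCoreA (PySem.Chars.strip (PySem.Chars.slice (PySem.Chars.strip s0) (some 4) none)) = [] then PySem.Chars.strip s0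
          else PySem.Chars.strip ("CAL".toList ++ " ".toList ++ pvCoreA (PySem.Chars.strip (PySem.Chars.slice (PySem.Chars.strip s0) (some 4) none)))) := by
        rw [pvCoreA.eq_def, if_neg hs0, dif_neg h1, dif_neg h2, dif_neg h3, dif_pos h4]
      have hpeel : pvPeel (PySem.Chars.strip s0) [] = pvPeel (PySem.Chars.strip (PySem.Chars.slice (PySem.Chars.strip s0) (some 4) none)) ["CAL".toList] := by
        rw [pvPeel.eq_def, dif_neg h1, dif_neg h2, dif_neg h3, dif_pos h4]; rfl
      rw [hcore]
      exact pv_qual_step (c := 'C') (q := "AL".toList) rfl hpeel hrec.1 hrec.2.1 hrec.2.2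
    by_cases h5 : PySem.Chars.startswith (PySem.Chars.upper (PySem.Chars.strip s0)) "EST ".toList = true
    · have hXne : PySem.Chars.strip (PySem.Chars.slice (PySem.Chars.strip s0) (some 4) none) ≠ [] := by
        rw [pv_slice4]
        exact pv_strip_drop_ne (pv_strip_strip s0) hs0 (q := "EST".toList) h5 rfl
      have hrec := ih _ (hn ▸ pv_decA h5 rfl) _ rfl
        (by rw [pv_strip_strip]; exact hXne)
      rw [pv_strip_strip] at hrec
      have hcore : pvCoreA s0 = (if pvCoreA (PySem.Chars.strip (PySem.Chars.slice (PySem.Chars.strip s0) (some 4) none)) = [] then PySem.Chars.strip s0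
          else PySem.Chars.strip ("EST".toList ++ " ".toList ++ pvCoreA (PySem.Chars.strip (PySem.Chars.slice (PySem.Chars.strip s0) (some 4) none)))) := by
        rw [pvCoreA.eq_def, if_neg hs0, dif_neg h1, dif_neg h2, dif_neg h3, dif_neg h4, dif_pos h5]
      have hpeel : pvPeel (PySem.Chars.strip s0) [] = pvPeel (PySem.Chars.strip (PySem.Chars.slice (PySem.Chars.strip s0) (some 4) none)) ["EST".toList] := by
        rw [pvPeel.eq_def, dif_neg h1, dif_neg h2, dif_neg h3, dif_neg h4, dif_pos h5]; rfl
      rw [hcore]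
      exact pv_qual_step (c := 'E') (q := "ST".toList) rfl hpeel hrec.1 hrec.2.1 hrec.2.2
    have hb := pv_base_props hg hs0
    have hc := pv_coreA_base hs0 h1 h2 h3 h4 h5
    refine ⟨?_, by rw [hc]; exact hb.1, by rw [hc]; exact hb.2⟩
    rw [hc, pv_peel_none h1 h2 h3 h4 h5]
    simp [PySem.Chars.join_singleton]

-- ===== VERDICT (by name: the statement is the Claim_ definition above) =====
theorem normalize_gedcom_date_spec : Claim_equal_normalize_gedcom_date := by
  intro s _
  unfold Spec_normalize_gedcom_date normalize_gedcom_date normalize_gedcom_date_alt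
  by_cases hnil : PySem.Chars.strip s.toList = []
  · rw [if_pos hnil, pvCoreA.eq_def, if_pos hnil]
  · rw [if_neg hnil, (pv_main s.toList.length s.toList rfl hnil).1]
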